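-- pv_equiv track=rewrite | github.com/mrunalhirve12/Python_CTCI-practise | Companies/Clutter/Before and After puzzle.py | generate_phrases
-- ===== SOURCE A (Python) =====
-- def generate_phrases(phrases):
--     dict = {}
--     res = []
--     for i in range(len(phrases)):
--         arr = phrases[i].split()
--         s = ' '.join(arr[1:])
--         if arr[0] in dict:
--             dict[arr[0]].append(s)
--         else:
--             dict[arr[0]] = [s]
--     for i in range(len(phrases)):
--         arr = phrases[i].split()
--         s = ' '.join(arr)
--         if arr[len(arr)-1] in dict:
--             for value in dict[arr[len(arr)-1]]:
--                 temp = s + " "+value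
--                 res.append(temp)
--     return res
-- ===== SOURCE B (Python) =====
-- def generate_phrases(phrases):
--     res = []
--     for p in phrases:
--         pa = p.split()
--         s = ' '.join(pa)
--         last = pa[-1]
--         for q in phrases:
--             qa = q.split()
--             if qa[0] == last:
--                 res.append(s + ' ' + ' '.join(qa[1:]))
--     return res
-- ===== Notes on version B (the rewrite author's own statement) =====
-- stated objective: simpler
-- what changed: Replaced A's two-phase build-a-dict-of-first-word-groups-then-scan with a single direct double loop over the phrase list that needs no dictionary at all.
import Mathlib
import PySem

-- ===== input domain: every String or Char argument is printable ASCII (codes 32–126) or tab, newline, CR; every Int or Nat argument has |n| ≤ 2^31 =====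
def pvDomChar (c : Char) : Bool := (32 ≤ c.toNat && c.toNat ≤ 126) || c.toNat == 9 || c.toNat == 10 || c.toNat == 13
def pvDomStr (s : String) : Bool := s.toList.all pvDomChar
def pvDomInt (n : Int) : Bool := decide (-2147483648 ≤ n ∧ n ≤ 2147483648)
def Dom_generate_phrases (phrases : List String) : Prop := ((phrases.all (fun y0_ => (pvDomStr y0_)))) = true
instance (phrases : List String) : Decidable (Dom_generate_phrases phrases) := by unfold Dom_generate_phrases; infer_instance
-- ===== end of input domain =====

-- B drops A's index dictionary and does a direct double loop over the phrase list; return values agree on Pre_.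

-- ===== PORT A =====
def generate_phrases (phrases : List String) : List String :=
  let d : PySem.Dict String (List String) :=
    (PySem.List.pyRange 0 (PySem.List.len phrases) 1).foldl (fun d i =>
      let arr := PySem.Str.split₀ (PySem.List.pyGetD phrases i "")
      let s := PySem.Str.join " " (PySem.List.slice arr (some 1) none)
      let k := PySem.List.pyGetD arr 0 ""
      if d.contains k then d.insert k (d.getD k [] ++ [s]) else d.insert k [s])
      PySem.Dict.empty
  (PySem.List.pyRange 0 (PySem.List.len phrases) 1).foldl (fun res i =>
      let arr := PySem.Str.split₀ (PySem.List.pyGetD phrases i "")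
      let s := PySem.Str.join " " arr
      match d.get? (PySem.List.pyGetD arr ((arr.length : Int) - 1) "") with
      | some l => l.foldl (fun res v => res ++ [s ++ " " ++ v]) res
      | none => res) []

-- ===== PORT B =====
def generate_phrases_alt (phrases : List String) : List String :=
  phrases.foldl (fun res p =>
    let pa := PySem.Str.split₀ p
    let s := PySem.Str.join " " pa
    let last := PySem.List.pyGetD pa (-1) ""
    phrases.foldl (fun res q =>
      let qa := PySem.Str.split₀ q
      if PySem.List.pyGetD qa 0 "" == last then
        res ++ [s ++ " " ++ PySem.Str.join " " (PySem.List.slice qa (some 1) none)]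
      else res) res) []

-- ===== PRECONDITION & SPEC =====
-- Pre_ excludes phrases that split to no words (empty/whitespace-only strings): Python A raises IndexError there (so does B).
def Pre_generate_phrases (phrases : List String) : Prop :=
  ∀ p ∈ phrases, PySem.Str.split₀ p ≠ []
instance (phrases : List String) : Decidable (Pre_generate_phrases phrases) := by
  unfold Pre_generate_phrases; infer_instance
def pvWitness_generate_phrases : List String := ["mission statement", "a man on a mission"]

def Spec_generate_phrases (phrases : List String) (out : List String) : Prop := out = generate_phrases_alt phrases
instance (phrases : List String) (out : List String) : Decidable (Spec_generate_phrases phrases out) := by unfold Spec_generate_phrases; infer_instance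

-- ===== CLAIM (what is proved, stated in full; the proofs are below) =====
def Claim_equal_generate_phrases : Prop := ∀ (phrases : List String), Dom_generate_phrases phrases → Pre_generate_phrases phrases → Spec_generate_phrases phrases (generate_phrases phrases)

-- ===== LEMMAS AND PROOFS =====

-- first word, remainder, normalized phrase, last word of a phrase
def pvFw (p : String) : String := PySem.List.pyGetD (PySem.Str.split₀ p) 0 ""
def pvRst (p : String) : String := PySem.Str.join " " (PySem.List.slice (PySem.Str.split₀ p) (some 1) none)
def pvNm (p : String) : String := PySem.Str.join " " (PySem.Str.split₀ p)
def pvLw (p : String) : String := PySem.List.pyGetD (PySem.Str.split₀ p) (-1) ""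

-- the loop bodies of the two ports, as standalone functions (definitionally equal to the ports' lambdas)
def pvStepD (d : PySem.Dict String (List String)) (p : String) : PySem.Dict String (List String) :=
  let arr := PySem.Str.split₀ p
  let s := PySem.Str.join " " (PySem.List.slice arr (some 1) none)
  let k := PySem.List.pyGetD arr 0 ""
  if d.contains k then d.insert k (d.getD k [] ++ [s]) else d.insert k [s]

def pvStepR (d : PySem.Dict String (List String)) (res : List String) (p : String) : List String :=
  let arr := PySem.Str.split₀ p
  let s := PySem.Str.join " " arr
  match d.get? (PySem.List.pyGetD arr ((arr.length : Int) - 1) "") with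
  | some l => l.foldl (fun res v => res ++ [s ++ " " ++ v]) res
  | none => res

def pvStepB (phrases : List String) (res : List String) (p : String) : List String :=
  let pa := PySem.Str.split₀ p
  let s := PySem.Str.join " " pa
  let last := PySem.List.pyGetD pa (-1) ""
  phrases.foldl (fun res q =>
    let qa := PySem.Str.split₀ q
    if PySem.List.pyGetD qa 0 "" == last then
      res ++ [s ++ " " ++ PySem.Str.join " " (PySem.List.slice qa (some 1) none)]
    else res) res

lemma pvLw_eq (p : String) :
    PySem.List.pyGetD (PySem.Str.split₀ p) (((PySem.Str.split₀ p).length : Int) - 1) "" = pvLw p := by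
  unfold pvLw
  cases h : PySem.Str.split₀ p with
  | nil => simp [PySem.List.pyGetD]
  | cons a t =>
    have h1 : ((((a :: t) : List String).length : Int) - 1) = (((a :: t).length - 1 : Nat) : Int) := by
      simp
    have hm : ((-1 : Int)) = -((1 : Nat) : Int) := by norm_num
    rw [h1, PySem.List.pyGetD_natCast, hm,
      PySem.List.pyGetD_neg_natCast (a :: t) 1 "" (by omega) (by simp)]
    rw [List.getD_eq_getElem _ _ (by simp)]
    rfl

-- characterization of A's dictionary: value at key c = remainders of phrases whose first word is c
lemma pvDict_getD (phrases : List String) (c : String) :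
    (phrases.foldl pvStepD (PySem.Dict.empty : PySem.Dict String (List String))).getD c []
    = (phrases.filter (fun q => pvFw q == c)).map pvRst := by
  have hstep : pvStepD = fun d p => d.modify (pvFw p) [] (· ++ [pvRst p]) := by
    funext d p
    unfold pvStepD
    simp only [pvFw, pvRst]
    by_cases h : d.contains (PySem.List.pyGetD (PySem.Str.split₀ p) 0 "") = true
    · simp [h, PySem.Dict.modify]
    · have h' : d.contains (PySem.List.pyGetD (PySem.Str.split₀ p) 0 "") = false := by
        simpa using h
      simp [h', PySem.Dict.modify, PySem.Dict.getD_of_not_contains d [] h']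
  rw [hstep]
  have hmap : phrases.foldl (fun d p => d.modify (pvFw p) [] (· ++ [pvRst p]))
      (PySem.Dict.empty : PySem.Dict String (List String))
      = (phrases.map (fun p => (pvFw p, pvRst p))).foldl
          (fun d pr => d.modify pr.1 [] (· ++ [pr.2])) PySem.Dict.empty := by
    rw [List.foldl_map]
  rw [hmap, PySem.Dict.getD_foldl_modify_append]
  simp [List.filter_map, Function.comp_def]

lemma pvFold_eq (phrases : List String) (init : List String)
    (d : PySem.Dict String (List String))
    (hd : ∀ c, d.getD c [] = (phrases.filter (fun q => pvFw q == c)).map pvRst) :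
    phrases.foldl (pvStepR d) init = phrases.foldl (pvStepB phrases) init := by
  apply PySem.List.foldl_congr_mem
  intro res p _
  unfold pvStepR pvStepB
  simp only [pvLw_eq]
  change (match d.get? (pvLw p) with
      | some l => List.foldl (fun res v => res ++ [pvNm p ++ " " ++ v]) res l
      | none => res) =
    List.foldl (fun res q =>
      if (pvFw q == pvLw p) = true then res ++ [pvNm p ++ " " ++ pvRst q] else res) res phrases
  have hB : List.foldl (fun res q =>
        if (pvFw q == pvLw p) = true then res ++ [pvNm p ++ " " ++ pvRst q] else res) res phrases
      = res ++ List.map (fun q => pvNm p ++ " " ++ pvRst q)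
          (List.filter (fun q => pvFw q == pvLw p) phrases) :=
    PySem.List.foldl_append_if _ _ phrases res
  rw [hB]
  cases h : d.get? (pvLw p) with
  | none =>
    have he : d.getD (pvLw p) [] = [] := PySem.Dict.getD_of_get?_eq_none _ _ h
    rw [hd] at he
    have hf : (phrases.filter (fun q => pvFw q == pvLw p)) = [] := by
      simpa using he
    simp [hf]
  | some l =>
    have he : d.getD (pvLw p) [] = l := PySem.Dict.getD_of_get?_eq_some _ _ h
    rw [hd] at he
    show l.foldl (fun res v => res ++ [pvNm p ++ " " ++ v]) res = _
    rw [PySem.List.foldl_append_singleton_eq_map, ← he]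
    simp [List.map_map, Function.comp_def]

-- ===== VERDICT (by name: the statement is the Claim_ definition above) =====
theorem generate_phrases_spec : Claim_equal_generate_phrases := by
  intro phrases _ _
  show generate_phrases phrases = generate_phrases_alt phrases
  have h2 : (PySem.List.pyRange 0 (PySem.List.len phrases) 1).foldl
      (fun d i => pvStepD d (PySem.List.pyGetD phrases i "")) PySem.Dict.empty
      = phrases.foldl pvStepD PySem.Dict.empty :=
    PySem.List.foldl_pyRange_zero_pyGetD phrases "" pvStepD PySem.Dict.empty
  have h3 : (PySem.List.pyRange 0 (PySem.List.len phrases) 1).foldl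
      (fun res i => pvStepR (phrases.foldl pvStepD PySem.Dict.empty) res (PySem.List.pyGetD phrases i "")) []
      = phrases.foldl (pvStepR (phrases.foldl pvStepD PySem.Dict.empty)) [] :=
    PySem.List.foldl_pyRange_zero_pyGetD phrases ""
      (pvStepR (phrases.foldl pvStepD PySem.Dict.empty)) []
  calc generate_phrases phrases
      = (PySem.List.pyRange 0 (PySem.List.len phrases) 1).foldl
          (fun res i => pvStepR ((PySem.List.pyRange 0 (PySem.List.len phrases) 1).foldl
              (fun d i => pvStepD d (PySem.List.pyGetD phrases i "")) PySem.Dict.empty)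
            res (PySem.List.pyGetD phrases i "")) [] := rfl
    _ = (PySem.List.pyRange 0 (PySem.List.len phrases) 1).foldl
          (fun res i => pvStepR (phrases.foldl pvStepD PySem.Dict.empty)
            res (PySem.List.pyGetD phrases i "")) [] := by rw [h2]
    _ = phrases.foldl (pvStepR (phrases.foldl pvStepD PySem.Dict.empty)) [] := h3
    _ = phrases.foldl (pvStepB phrases) [] :=
        pvFold_eq phrases [] _ (fun c => pvDict_getD phrases c)
    _ = generate_phrases_alt phrases := rfl
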